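-- pv_equiv track=rewrite | github.com/ZhaoGuan/ig_crawler | ig_crawler/tools/user_mysql.py | mapping_sort_from_list
-- ===== SOURCE A (Python) =====
-- def mapping_sort_from_list(data: list):
--     value = set(data)
--     times = []
--     index = []
--     for i in value:
--         times.append(data.count(i))
--         index.append(data.index(i))
--     res = []
--     for i in zip(value, times, index):
--         res.append(i)
--     res = sorted(res, key=lambda x: (-x[1], x[2]))  # 负号表示从大到小，因为默认是从小到大
--     ans = []
--     for item in res:
--         ans += [item[0]] * item[1]
--     result = {}
--     for i in ans:
--         if i not in result:
--             result[i] = 1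
--         else:
--             result[i] += 1
--     return result
-- ===== SOURCE B (Python) =====
-- def mapping_sort_from_list(data: list):
--     # Counting-sort by frequency: one pass to count (dict keeps first-appearance
--     # order), buckets indexed by count, highest bucket first.
--     counts = {}
--     for x in data:
--         counts[x] = counts.get(x, 0) + 1
--     m = 0
--     for c in counts.values():
--         if c > m:
--             m = c
--     buckets = [[] for _ in range(m + 1)]
--     for x, c in counts.items():
--         buckets[c].append(x)
--     result = {}
--     for c in range(m, 0, -1):
--         for x in buckets[c]:
--             result[x] = c
--     return result
-- ===== Notes on version B (the rewrite author's own statement) =====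
-- stated objective: faster
-- what changed: Replaces A's per-distinct-element count()/index() scans plus comparison sort plus expand-and-recount passes with a single counting pass into an insertion-ordered dict followed by a counting-sort over frequency buckets (first-appearance order within a bucket), emitting counts from the highest bucket down.
import Mathlib
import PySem

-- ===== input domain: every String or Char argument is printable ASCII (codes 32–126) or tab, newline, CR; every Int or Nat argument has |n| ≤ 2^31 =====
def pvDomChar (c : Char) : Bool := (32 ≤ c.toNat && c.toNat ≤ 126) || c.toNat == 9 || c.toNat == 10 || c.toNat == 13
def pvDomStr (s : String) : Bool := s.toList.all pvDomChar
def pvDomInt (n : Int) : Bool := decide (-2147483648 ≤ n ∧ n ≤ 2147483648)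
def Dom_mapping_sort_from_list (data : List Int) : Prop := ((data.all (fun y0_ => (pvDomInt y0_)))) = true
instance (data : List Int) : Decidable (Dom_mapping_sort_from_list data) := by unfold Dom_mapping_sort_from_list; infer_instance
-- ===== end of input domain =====

-- B replaces A's per-distinct-element count()/index() scans + comparison sort + expand-and-recount
-- passes with one counting pass and a counting-sort over frequency buckets (objective: faster).

-- ===== PORT A =====
-- A sorts by the injective key (-count, first-index), so its result does not depend on the
-- iteration order of set(data); Set.ofList's first-occurrence order is therefore exact here.
-- data.index(i) is ported as (index? data i).getD 0: i always comes from set(data), so it never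
-- raises and the default is never used.
def mapping_sort_from_list (data : List Int) : List (Int × Int) :=
  let value := PySem.Set.ofList data
  let times := value.map (fun i => (PySem.List.count data i : Int))
  let index := value.map (fun i => (((PySem.List.index? data i).getD 0 : Nat) : Int))
  let res := value.zip (times.zip index)
  let res2 := PySem.List.sorted2 res (fun x => -x.2.1) (fun x => x.2.2)
  let ans := res2.foldl (fun a item => a ++ List.replicate item.2.1.toNat item.1) []
  let result := ans.foldl
    (fun d i => if d.contains i then d.insert i (d.getD i 0 + 1) else d.insert i 1)
    PySem.Dict.empty
  result.items

-- ===== PORT B =====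
def mapping_sort_from_list_alt (data : List Int) : List (Int × Int) :=
  let counts := data.foldl (fun d x => d.insert x (d.getD x 0 + 1)) PySem.Dict.empty
  let m := counts.values.foldl (fun m c => if c > m then c else m) (0 : Int)
  let buckets := counts.items.foldl
    (fun b p => PySem.List.pySetD b p.2 (PySem.List.pyGetD b p.2 [] ++ [p.1]))
    (List.replicate (m.toNat + 1) ([] : List Int))
  let result := (PySem.List.pyRange m 0 (-1)).foldl
    (fun d c => (PySem.List.pyGetD buckets c []).foldl (fun d x => d.insert x c) d)
    PySem.Dict.empty
  result.items

-- ===== PRECONDITION & SPEC =====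
def Spec_mapping_sort_from_list (data : List Int) (out : List (Int × Int)) : Prop := out = mapping_sort_from_list_alt data
instance (data : List Int) (out : List (Int × Int)) : Decidable (Spec_mapping_sort_from_list data out) := by unfold Spec_mapping_sort_from_list; infer_instance

-- ===== CLAIM (what is proved, stated in full; the proofs are below) =====
def Claim_equal_mapping_sort_from_list : Prop := ∀ (data : List Int), Dom_mapping_sort_from_list data → Spec_mapping_sort_from_list data (mapping_sort_from_list data)

-- ===== LEMMAS AND PROOFS =====

-- the strict order A sorts by, as the Boolean comparator sorted2 actually uses
def pvLtB (a b : Int × Int × Int) : Bool :=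
  decide (-a.2.1 < -b.2.1) || (!decide (-b.2.1 < -a.2.1) && decide (a.2.2 < b.2.2))

def pvCnt (data : List Int) (v : Int) : Int := (PySem.List.count data v : Int)
def pvIdx (data : List Int) (v : Int) : Int := ((PySem.List.index? data v).getD 0 : Nat)
def pvF (data : List Int) (v : Int) : Int × Int × Int := (v, pvCnt data v, pvIdx data v)

theorem pvLtB_trans {a b c : Int × Int × Int} (h1 : pvLtB a b = true) (h2 : pvLtB b c = true) :
    pvLtB a c = true := by
  simp only [pvLtB, Bool.or_eq_true, Bool.and_eq_true, Bool.not_eq_true', decide_eq_true_eq,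
    decide_eq_false_iff_not] at *
  omega

theorem pvLtB_asymm {a b : Int × Int × Int} (h1 : pvLtB a b = true) (h2 : pvLtB b a = true) :
    False := by
  simp only [pvLtB, Bool.or_eq_true, Bool.and_eq_true, Bool.not_eq_true', decide_eq_true_eq,
    decide_eq_false_iff_not] at *
  omega

theorem pvLtB_total {a b : Int × Int × Int} (h : a.2.2 ≠ b.2.2) :
    pvLtB a b = true ∨ pvLtB b a = true := by
  simp only [pvLtB, Bool.or_eq_true, Bool.and_eq_true, Bool.not_eq_true', decide_eq_true_eq,
    decide_eq_false_iff_not]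
  omega

theorem pv_zip_map_map {α β γ : Type} (l : List α) (g : α → β) (h : α → γ) :
    l.zip ((l.map g).zip (l.map h)) = l.map (fun v => (v, g v, h v)) := by
  induction l with
  | nil => rfl
  | cons x xs ih => simp [ih]

theorem pv_insertBy_perm (before : (Int × Int × Int) → (Int × Int × Int) → Bool)
    (x : Int × Int × Int) (acc : List (Int × Int × Int)) :
    (PySem.List.insertBy before x acc).Perm (x :: acc) := by
  induction acc with
  | nil => simp [PySem.List.insertBy]
  | cons y ys ih =>
    simp only [PySem.List.insertBy]
    split
    · exact List.Perm.refl _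
    · exact (ih.cons y).trans (List.Perm.swap x y ys)

theorem pv_insertBy_pairwise (x : Int × Int × Int) (acc : List (Int × Int × Int))
    (hacc : acc.Pairwise (fun a b => pvLtB a b = true))
    (htot : ∀ y ∈ acc, pvLtB x y = true ∨ pvLtB y x = true) :
    (PySem.List.insertBy pvLtB x acc).Pairwise (fun a b => pvLtB a b = true) := by
  induction acc with
  | nil => simp [PySem.List.insertBy]
  | cons y ys ih =>
    simp only [PySem.List.insertBy]
    rcases List.pairwise_cons.mp hacc with ⟨hy, hys⟩
    split
    · rename_i hxy
      refine List.pairwise_cons.mpr ⟨?_, hacc⟩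
      intro z hz
      rcases List.mem_cons.mp hz with rfl | hz
      · exact hxy
      · exact pvLtB_trans hxy (hy z hz)
    · rename_i hxy
      have hyx : pvLtB y x = true := by
        rcases htot y (by simp) with h | h
        · exact absurd h hxy
        · exact h
      refine List.pairwise_cons.mpr ⟨?_, ih hys (fun z hz => htot z (by simp [hz]))⟩
      intro z hz
      rcases (PySem.List.mem_insertBy pvLtB x z ys).mp hz with rfl | hz
      · exact hyx
      · exact hy z hz

theorem pv_foldl_insertBy_pairwise (l acc : List (Int × Int × Int))
    (hacc : acc.Pairwise (fun a b => pvLtB a b = true))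
    (hidx : (acc ++ l).Pairwise (fun a b => a.2.2 ≠ b.2.2)) :
    (l.foldl (fun acc x => PySem.List.insertBy pvLtB x acc) acc).Pairwise
      (fun a b => pvLtB a b = true) := by
  induction l generalizing acc with
  | nil => simpa using hacc
  | cons x xs ih =>
    simp only [List.foldl_cons]
    have hxacc : ∀ y ∈ acc, pvLtB x y = true ∨ pvLtB y x = true := by
      intro y hy
      have : y.2.2 ≠ x.2.2 := by
        have := (List.pairwise_append.mp hidx).2.2 y hy x (by simp)
        exact this
      rcases pvLtB_total this with h | h
      · right; exact h
      · left; exact h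
    refine ih _ (pv_insertBy_pairwise x acc hacc hxacc) ?_
    have hperm : (PySem.List.insertBy pvLtB x acc ++ xs).Perm (acc ++ x :: xs) := by
      have h1 : (PySem.List.insertBy pvLtB x acc ++ xs).Perm ((x :: acc) ++ xs) :=
        (pv_insertBy_perm pvLtB x acc).append_right xs
      have h2 : (acc ++ x :: xs).Perm (x :: (acc ++ xs)) := List.perm_middle
      exact h1.trans h2.symm
    -- (a.2.2 ≠ b.2.2) is symmetric, so Pairwise transfers along the permutation
    exact (hperm.pairwise_iff (fun h => Ne.symm h)).mpr hidx

theorem pv_pairwise_unique (p q : List (Int × Int × Int)) (hperm : p.Perm q)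
    (hp : p.Pairwise (fun a b => pvLtB a b = true))
    (hq : q.Pairwise (fun a b => pvLtB a b = true)) : p = q := by
  induction p generalizing q with
  | nil => simpa using hperm.nil_eq
  | cons a p' ih =>
    cases q with
    | nil => exact absurd hperm.symm.nil_eq (by simp)
    | cons b q' =>
      rcases List.pairwise_cons.mp hp with ⟨hap, hp'⟩
      rcases List.pairwise_cons.mp hq with ⟨hbq, hq'⟩
      by_cases hab : a = b
      · subst hab
        exact congrArg (a :: ·) (ih q' hperm.cons_inv hp' hq')
      · exfalso
        have haq : a ∈ b :: q' := hperm.mem_iff.mp (by simp)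
        have hbp : b ∈ a :: p' := hperm.symm.mem_iff.mp (by simp)
        have haq' : a ∈ q' := by
          rcases List.mem_cons.mp haq with h | h
          · exact absurd h hab
          · exact h
        have hbp' : b ∈ p' := by
          rcases List.mem_cons.mp hbp with h | h
          · exact absurd h.symm hab
          · exact h
        exact pvLtB_asymm (hbq a haq') (hap b hbp')

-- first-occurrence order = strictly increasing first index
theorem pv_ofList_pairwise_idx (xs : List Int) :
    (PySem.Set.ofList xs).Pairwise (fun a b => pvIdx xs a < pvIdx xs b) := by
  induction xs using List.reverseRecOn with
  | nil => simp [PySem.Set.ofList, PySem.Set.empty]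
  | append_singleton xs x ih =>
    rw [PySem.Set.ofList_append_singleton]
    by_cases hx : x ∈ PySem.Set.ofList xs
    · have hadd : (PySem.Set.ofList xs).add x = PySem.Set.ofList xs := by
        simp [PySem.Set.add]
        exact (PySem.Set.mem_ofList xs x).mp hx
      rw [hadd]
      refine ih.imp_of_mem ?_
      intro a b ha hb hlt
      have hax : a ∈ xs := (PySem.Set.mem_ofList xs a).mp ha
      have hbx : b ∈ xs := (PySem.Set.mem_ofList xs b).mp hb
      rwa [pvIdx, pvIdx, PySem.List.index?_append_of_mem [x] hax,
        PySem.List.index?_append_of_mem [x] hbx]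
    · have hxm : x ∉ xs := fun h => hx ((PySem.Set.mem_ofList xs x).mpr h)
      have hadd : (PySem.Set.ofList xs).add x = PySem.Set.ofList xs ++ [x] := by
        simp [PySem.Set.add]
        exact hxm
      rw [hadd]
      rw [List.pairwise_append]
      refine ⟨?_, by simp, ?_⟩
      · refine ih.imp_of_mem ?_
        intro a b ha hb hlt
        have hax : a ∈ xs := (PySem.Set.mem_ofList xs a).mp ha
        have hbx : b ∈ xs := (PySem.Set.mem_ofList xs b).mp hb
        rwa [pvIdx, pvIdx, PySem.List.index?_append_of_mem [x] hax,
          PySem.List.index?_append_of_mem [x] hbx]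
      · intro a ha b hb
        rcases List.mem_singleton.mp hb
        have hax : a ∈ xs := (PySem.Set.mem_ofList xs a).mp ha
        have hxidx : pvIdx (xs ++ [x]) x = (xs.length : Int) := by
          rw [pvIdx, PySem.List.index?_append_singleton_self xs x hxm]; rfl
        have : pvIdx (xs ++ [x]) a < (xs.length : Int) := by
          rw [pvIdx, PySem.List.index?_append_of_mem [x] hax]
          obtain ⟨k, hk⟩ := Option.isSome_iff_exists.mp
            ((PySem.List.index?_isSome_iff xs a).mpr hax)
          obtain ⟨hlt, -, -⟩ := PySem.List.getElem_of_index?_eq_some hk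
          rw [hk]
          simpa using hlt
        rw [hxidx]; exact this

-- descending range [m, m-1, …, 1]
theorem pv_rangeDesc (m : Int) (hm : 0 ≤ m) :
    PySem.List.pyRange m 0 (-1) = List.map (fun k : Nat => m + (-1) * (k : Int)) (List.range m.toNat) := by
  simp only [PySem.List.pyRange]
  rw [if_neg (by norm_num), if_neg (by norm_num : ¬ ((0:Int) < -1))]
  by_cases h : (0:Int) < m
  · rw [if_pos h, show ((m - 0 + -(-1) - 1) / -(-1)) = m from by norm_num]
  · rw [if_neg h]
    have : m = 0 := by omega
    simp [this]

theorem pv_foldl_max_init (l : List Int) (a : Int) :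
    a ≤ l.foldl (fun m c => if c > m then c else m) a := by
  induction l generalizing a with
  | nil => simp
  | cons x xs ih =>
    simp only [List.foldl_cons]
    split
    · exact le_trans (by omega) (ih x)
    · exact ih a

theorem pv_foldl_max_mem (l : List Int) (a c : Int) (hc : c ∈ l) :
    c ≤ l.foldl (fun m c => if c > m then c else m) a := by
  induction l generalizing a with
  | nil => simp at hc
  | cons x xs ih =>
    simp only [List.foldl_cons]
    rcases List.mem_cons.mp hc with rfl | hc
    · split
      · exact pv_foldl_max_init xs c
      · exact le_trans (by omega) (pv_foldl_max_init xs a)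
    · split <;> exact ih _ hc


theorem pv_repl_getD (n : Nat) (c : Int) :
    PySem.List.pyGetD (List.replicate n ([]:List Int)) c [] = [] := by
  have h : ∀ o : Option Nat, ((o.bind fun a => (List.replicate n ([]:List Int))[a]?).getD []) = [] := by
    intro o
    cases o with
    | none => rfl
    | some a =>
      simp only [Option.bind_some, List.getElem?_replicate]
      split <;> rfl
  simp only [PySem.List.pyGetD, PySem.List.pyGet?, PySem.List.pyIdx?, List.length_replicate]
  exact h _

theorem pv_buckets (ps : List (Int × Int)) (b : List (List Int))
    (hps : ∀ p ∈ ps, 0 ≤ p.2 ∧ p.2 < (b.length : Int)) (c : Int) (hc : 0 ≤ c) :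
    PySem.List.pyGetD (ps.foldl (fun b p => PySem.List.pySetD b p.2 (PySem.List.pyGetD b p.2 [] ++ [p.1])) b) c []
      = PySem.List.pyGetD b c [] ++ (ps.filter (fun p => p.2 == c)).map (·.1) := by
  induction ps generalizing b with
  | nil => simp
  | cons p ps ih =>
    simp only [List.foldl_cons]
    obtain ⟨h0, hlen⟩ := hps p (by simp)
    have hpn : p.2 = ((p.2.toNat : Nat) : Int) := by omega
    have hcn : c = ((c.toNat : Nat) : Int) := by omega
    have hb' : ∀ q ∈ ps, 0 ≤ q.2 ∧ q.2 < ((PySem.List.pySetD b p.2 (PySem.List.pyGetD b p.2 [] ++ [p.1])).length : Int) := by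
      intro q hq
      rw [PySem.List.length_pySetD]
      exact hps q (by simp [hq])
    rw [ih _ hb']
    rw [hpn, hcn, PySem.List.pyGetD_pySetD_natCast _ _ _ _ _ (by omega)]
    by_cases he : c.toNat = p.2.toNat
    · have hpc : p.2 = c := by omega
      rw [if_pos he, ← hcn, ← hpn]
      simp [hpc]
    · have hpc : (p.2 == c) = false := by simp; omega
      rw [if_neg he, ← hcn]
      simp [hpc]

theorem pv_flatten_if_perm {α : Type} (cs : List Int) (c0 : Int) (x : α) (h : Int → List α)
    (hnd : cs.Nodup) (hmem : c0 ∈ cs) :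
    ((cs.map (fun c => if c0 = c then x :: h c else h c)).flatten).Perm
      (x :: (cs.map h).flatten) := by
  induction cs with
  | nil => simp at hmem
  | cons c cs ih =>
    rcases List.nodup_cons.mp hnd with ⟨hc, hnd'⟩
    by_cases he : c0 = c
    · subst he
      have hrest : cs.map (fun c => if c0 = c then x :: h c else h c) = cs.map h := by
        apply List.map_congr_left
        intro a ha
        rw [if_neg]
        intro hca; exact hc (hca ▸ ha)
      simp [hrest]
    · have hmem' : c0 ∈ cs := by
        rcases List.mem_cons.mp hmem with h1 | h1
        · exact absurd h1 he
        · exact h1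
      simp only [List.map_cons, List.flatten_cons, if_neg he]
      have := (ih hnd' hmem').append_left (h c)
      refine this.trans ?_
      exact (List.perm_middle (a := x) (l₁ := h c) (l₂ := (cs.map h).flatten)).symm.symm

theorem pv_perm_flatten_filter {α : Type} (u : List α) (g : α → Int) (cs : List Int)
    (hnd : cs.Nodup) (hmem : ∀ v ∈ u, g v ∈ cs) :
    ((cs.map (fun c => u.filter (fun v => g v == c))).flatten).Perm u := by
  induction u with
  | nil => simp
  | cons x u ih =>
    have hx := hmem x (by simp)
    have hstep : cs.map (fun c => (x :: u).filter (fun v => g v == c))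
        = cs.map (fun c => if g x = c then x :: u.filter (fun v => g v == c) else u.filter (fun v => g v == c)) := by
      apply List.map_congr_left; intro c hc
      by_cases he : g x = c
      · simp [he]
      · simp [he]
    rw [hstep]
    exact (pv_flatten_if_perm cs (g x) x (fun c => u.filter (fun v => g v == c)) hnd hx).trans
      ((ih (fun v hv => hmem v (by simp [hv]))).cons x)

theorem pv_repl_fold_aux (k : Nat) (v : Int) (c : Int) (d : PySem.Dict Int Int) :
    (List.replicate k v).foldl
      (fun d i => if d.contains i then d.insert i (d.getD i 0 + 1) else d.insert i 1)
      (d.insert v c)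
    = d.insert v (c + k) := by
  induction k generalizing c with
  | zero => simp
  | succ k ih =>
    rw [List.replicate_succ, List.foldl_cons]
    rw [if_pos (by simp)]
    rw [PySem.Dict.getD_insert_self, PySem.Dict.insert_insert_self, ih]
    congr 1
    push_cast
    ring

theorem pv_repl_fold (n : Nat) (v : Int) (d : PySem.Dict Int Int) (hd : d.contains v = false)
    (hn : 0 < n) :
    (List.replicate n v).foldl
      (fun d i => if d.contains i then d.insert i (d.getD i 0 + 1) else d.insert i 1) d
    = d.insert v n := by
  obtain ⟨k, rfl⟩ : ∃ k, n = k + 1 := ⟨n - 1, by omega⟩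
  rw [List.replicate_succ, List.foldl_cons, if_neg (by simp [hd]), pv_repl_fold_aux]
  congr 1
  push_cast
  ring

theorem pv_items_count_blocks (L : List (Int × Int × Int)) (d : PySem.Dict Int Int)
    (hd : ∀ it ∈ L, d.contains it.1 = false) (hnd : (L.map (·.1)).Nodup)
    (hpos : ∀ it ∈ L, 0 < it.2.1) :
    (((L.map (fun it => List.replicate it.2.1.toNat it.1)).flatten).foldl
      (fun d i => if d.contains i then d.insert i (d.getD i 0 + 1) else d.insert i 1) d).items
    = d.items ++ L.map (fun it => (it.1, it.2.1)) := by
  induction L generalizing d with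
  | nil => simp
  | cons it L ih =>
    simp only [List.map_cons, List.flatten_cons, List.foldl_append]
    have hpos0 := hpos it (by simp)
    have htn : (0:Nat) < it.2.1.toNat := by omega
    rw [pv_repl_fold _ _ _ (hd it (by simp)) htn]
    rcases List.nodup_cons.mp hnd with ⟨hnotin, hnd'⟩
    have hd' : ∀ jt ∈ L, (d.insert it.1 it.2.1.toNat).contains jt.1 = false := by
      intro jt hjt
      rw [PySem.Dict.contains_insert]
      have hne : jt.1 ≠ it.1 := by
        intro he
        have hm : jt.1 ∈ List.map (fun x => x.1) L := List.mem_map_of_mem hjt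
        rw [he] at hm
        exact hnotin hm
      simp [hne, hd jt (by simp [hjt])]
    rw [ih _ hd' hnd' (fun jt hjt => hpos jt (by simp [hjt]))]
    rw [PySem.Dict.items_insert_of_not_contains _ _ (hd it (by simp))]
    have : ((it.2.1.toNat : Nat) : Int) = it.2.1 := by omega
    simp [this]

-- names for the common intermediate lists
def pvU (data : List Int) : List Int := PySem.Set.ofList data
def pvS (data : List Int) : List (Int × Int × Int) :=
  ((pvU data).map (pvF data)).foldl (fun acc x => PySem.List.insertBy pvLtB x acc) []
def pvM (data : List Int) : Int :=
  ((pvU data).map (pvCnt data)).foldl (fun m c => if c > m then c else m) 0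
def pvCs (data : List Int) : List Int := PySem.List.pyRange (pvM data) 0 (-1)
def pvT (data : List Int) : List (Int × Int × Int) :=
  ((pvCs data).map (fun c => ((pvU data).filter (fun v => pvCnt data v == c)).map (pvF data))).flatten

theorem pvS_perm (data : List Int) : (pvS data).Perm ((pvU data).map (pvF data)) := by
  have := PySem.List.foldl_insertBy_perm pvLtB ((pvU data).map (pvF data)) []
  simpa [pvS] using this

theorem pvS_map_fst_nodup (data : List Int) : ((pvS data).map (·.1)).Nodup := by
  have hperm : ((pvS data).map (·.1)).Perm (((pvU data).map (pvF data)).map (·.1)) :=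
    (pvS_perm data).map _
  have h2 : (((pvU data).map (pvF data)).map (·.1)) = pvU data := by
    rw [List.map_map]
    have : ((fun x : Int × Int × Int => x.1) ∘ pvF data) = id := by funext v; rfl
    rw [this, List.map_id]
  rw [h2] at hperm
  exact hperm.nodup_iff.mpr (PySem.Set.nodup_ofList data)

theorem pv_cnt_pos (data : List Int) (v : Int) (hv : v ∈ pvU data) : 0 < pvCnt data v := by
  have hvd : v ∈ data := (PySem.Set.mem_ofList data v).mp hv
  simp only [pvCnt]
  rw [PySem.List.count_eq]
  exact_mod_cast List.count_pos_iff.mpr hvd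

theorem pv_lemA (data : List Int) :
    mapping_sort_from_list data = (pvS data).map (fun it => (it.1, it.2.1)) := by
  simp only [mapping_sort_from_list]
  rw [pv_zip_map_map]
  have hres2 : PySem.List.sorted2 ((PySem.Set.ofList data).map
      (fun v => (v, (PySem.List.count data v : Int), (((PySem.List.index? data v).getD 0 : Nat) : Int))))
      (fun x => -x.2.1) (fun x => x.2.2) = pvS data := rfl
  rw [hres2]
  have hans : (pvS data).foldl (fun a item => a ++ List.replicate item.2.1.toNat item.1) []
      = ((pvS data).map (fun it => List.replicate it.2.1.toNat it.1)).flatten := by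
    rw [← List.foldl_map, PySem.List.foldl_append_eq_flatten]
    simp
  rw [hans]
  rw [pv_items_count_blocks _ _ (by simp [PySem.Dict.contains_empty]) (pvS_map_fst_nodup data) ?hpos]
  · simp [PySem.Dict.empty]
  case hpos =>
    intro it hit
    have hmem : it ∈ (pvU data).map (pvF data) := (pvS_perm data).mem_iff.mp hit
    obtain ⟨v, hv, rfl⟩ := List.mem_map.mp hmem
    exact pv_cnt_pos data v hv


theorem pvM_nonneg (data : List Int) : 0 ≤ pvM data := pv_foldl_max_init _ _

theorem pv_cnt_le_M (data : List Int) (v : Int) (hv : v ∈ pvU data) : pvCnt data v ≤ pvM data :=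
  pv_foldl_max_mem _ _ _ (List.mem_map_of_mem hv)

theorem pvCs_eq (data : List Int) :
    pvCs data = List.map (fun k : Nat => pvM data + (-1) * (k : Int)) (List.range (pvM data).toNat) :=
  pv_rangeDesc _ (pvM_nonneg data)

theorem pvCs_mem (data : List Int) (c : Int) : c ∈ pvCs data ↔ 1 ≤ c ∧ c ≤ pvM data := by
  rw [pvCs_eq]
  simp only [List.mem_map, List.mem_range]
  constructor
  · rintro ⟨k, hk, rfl⟩
    omega
  · rintro ⟨h1, h2⟩
    refine ⟨(pvM data - c).toNat, by omega, by omega⟩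

theorem pvCs_nodup (data : List Int) : (pvCs data).Nodup := by
  rw [pvCs_eq]
  exact List.Nodup.map (fun a b h => by omega) (List.nodup_range)

theorem pvCs_pairwise_gt (data : List Int) : (pvCs data).Pairwise (fun a b => a > b) := by
  rw [pvCs_eq]
  exact List.pairwise_map.mpr (List.pairwise_lt_range.imp (fun {a b} h => by omega))

theorem pv_cnt_mem_cs (data : List Int) (v : Int) (hv : v ∈ pvU data) :
    pvCnt data v ∈ pvCs data :=
  (pvCs_mem data _).mpr ⟨pv_cnt_pos data v hv, pv_cnt_le_M data v hv⟩

theorem pv_counts_items (data : List Int) :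
    (PySem.Dict.counter data).items = (pvU data).map (fun k => (k, pvCnt data k)) := by
  rw [PySem.Dict.items_counter]
  apply List.map_congr_left
  intro v _
  simp [pvCnt, PySem.List.count_eq]

theorem pv_bucket_eq (data : List Int) (c : Int) (hc : 0 ≤ c) :
    PySem.List.pyGetD
      ((PySem.Dict.counter data).items.foldl
        (fun b p => PySem.List.pySetD b p.2 (PySem.List.pyGetD b p.2 [] ++ [p.1]))
        (List.replicate ((pvM data).toNat + 1) ([] : List Int))) c []
    = (pvU data).filter (fun v => pvCnt data v == c) := by
  rw [pv_counts_items]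
  rw [pv_buckets _ _ ?hps c hc]
  case hps =>
    intro p hp
    obtain ⟨v, hv, rfl⟩ := List.mem_map.mp hp
    have h1 := pv_cnt_pos data v hv
    have h2 := pv_cnt_le_M data v hv
    have h3 := pvM_nonneg data
    simp only [List.length_replicate]
    constructor <;> omega
  rw [pv_repl_getD, List.nil_append, List.filter_map, List.map_map]
  have h1 : ((fun p : Int × Int => p.2 == c) ∘ fun k => (k, pvCnt data k)) = fun v => pvCnt data v == c := rfl
  have h2 : ((fun x : Int × Int => x.1) ∘ fun k => (k, pvCnt data k)) = id := rfl
  rw [h1, h2, List.map_id]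

theorem pv_lemB (data : List Int) :
    mapping_sort_from_list_alt data = (pvT data).map (fun it => (it.1, it.2.1)) := by
  simp only [mapping_sort_from_list_alt]
  rw [PySem.Dict.foldl_insert_getD_add_one_eq_counter]
  have hvals : (PySem.Dict.counter data).values.foldl (fun m c => if c > m then c else m) (0:Int)
      = pvM data := by
    have hv : (PySem.Dict.counter data).values = (pvU data).map (pvCnt data) := by
      have h0 : (PySem.Dict.counter data).values = (PySem.Dict.counter data).items.map (·.2) := rfl
      rw [h0, pv_counts_items, List.map_map]
      rfl
    rw [hv]; rfl
  rw [hvals]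
  -- name the bucket table
  set bkts := (PySem.Dict.counter data).items.foldl
      (fun b p => PySem.List.pySetD b p.2 (PySem.List.pyGetD b p.2 [] ++ [p.1]))
      (List.replicate ((pvM data).toNat + 1) ([] : List Int)) with hbkts
  -- the nested insert loop is the flat insert loop over the (element, count) pairs
  set P := ((pvCs data).map (fun c => (PySem.List.pyGetD bkts c []).map (fun x => (x, c)))).flatten
    with hP
  have hfold :
      (PySem.List.pyRange (pvM data) 0 (-1)).foldl
        (fun d c => (PySem.List.pyGetD bkts c []).foldl (fun d x => d.insert x c) d)
        PySem.Dict.empty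
      = P.foldl (fun d p => d.insert p.1 p.2) PySem.Dict.empty := by
    rw [hP, List.foldl_flatten, List.foldl_map]
    have hfn : (fun (d : PySem.Dict Int Int) c =>
        ((PySem.List.pyGetD bkts c []).map (fun x => (x, c))).foldl (fun d p => d.insert p.1 p.2) d)
        = fun d c => (PySem.List.pyGetD bkts c []).foldl (fun d x => d.insert x c) d := by
      funext d c
      rw [List.foldl_map]
    rw [← hfn]
    rfl
  rw [hfold]
  -- the buckets hold the filtered first-appearance lists
  have hbck : ∀ c ∈ pvCs data,
      PySem.List.pyGetD bkts c [] = (pvU data).filter (fun v => pvCnt data v == c) := by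
    intro c hc
    exact pv_bucket_eq data c (by have := (pvCs_mem data c).mp hc; omega)
  -- keys inserted are pairwise distinct
  have hPfst : P.map (·.1) = ((pvCs data).map (fun c => (pvU data).filter (fun v => pvCnt data v == c))).flatten := by
    rw [hP, List.map_flatten, List.map_map]
    congr 1
    apply List.map_congr_left
    intro c hc
    rw [Function.comp_apply, List.map_map]
    have : ((fun x : Int × Int => x.1) ∘ fun x => (x, c)) = id := rfl
    rw [this, List.map_id, hbck c hc]
  have hPperm : (P.map (·.1)).Perm (pvU data) := by
    rw [hPfst]
    exact pv_perm_flatten_filter (pvU data) (pvCnt data) (pvCs data) (pvCs_nodup data)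
      (fun v hv => pv_cnt_mem_cs data v hv)
  have hPnodup : (P.map (·.1)).Nodup := hPperm.nodup_iff.mpr (PySem.Set.nodup_ofList data)
  rw [PySem.Dict.items_foldl_insert_fresh P (·.1) (·.2) PySem.Dict.empty
    (fun p _ => PySem.Dict.contains_empty _) hPnodup]
  have hitems : List.map (fun a : Int × Int => (a.1, a.2)) P = P := by
    simp
  rw [hitems]
  -- P is the projection of the ordered triple list
  rw [hP, pvT, List.map_flatten, List.map_map]
  have : PySem.Dict.empty.items = ([] : List (Int × Int)) := rfl
  rw [this, List.nil_append]
  congr 1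
  apply List.map_congr_left
  intro c hc
  rw [Function.comp_apply, List.map_map, hbck c hc]
  apply List.map_congr_left
  intro v hv
  have hcv : pvCnt data v = c := by
    have := List.of_mem_filter hv
    simpa using this
  simp [pvF, hcv]

theorem pv_lemST (data : List Int) : pvS data = pvT data := by
  have hU := pv_ofList_pairwise_idx data
  -- S is a sorted (w.r.t. pvLtB) permutation of the triples
  have hSpair : (pvS data).Pairwise (fun a b => pvLtB a b = true) := by
    apply pv_foldl_insertBy_pairwise _ [] List.Pairwise.nil
    rw [List.nil_append]
    exact List.pairwise_map.mpr (hU.imp (fun {a b} h => by simp [pvF, pvIdx] at *; omega))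
  -- T is a permutation of the triples
  have hTperm : (pvT data).Perm ((pvU data).map (pvF data)) := by
    have hblocks : pvT data
        = ((pvCs data).map (fun c => ((pvU data).map (pvF data)).filter (fun t => t.2.1 == c))).flatten := by
      rw [pvT]
      congr 1
      apply List.map_congr_left
      intro c _
      rw [List.filter_map]
      rfl
    rw [hblocks]
    exact pv_perm_flatten_filter ((pvU data).map (pvF data)) (fun t => t.2.1) (pvCs data)
      (pvCs_nodup data)
      (fun t ht => by
        obtain ⟨v, hv, rfl⟩ := List.mem_map.mp ht
        exact pv_cnt_mem_cs data v hv)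
  -- T is also sorted w.r.t. pvLtB
  have hTpair : (pvT data).Pairwise (fun a b => pvLtB a b = true) := by
    rw [pvT]
    apply List.pairwise_flatten.mpr
    constructor
    · intro l hl
      obtain ⟨c, _, rfl⟩ := List.mem_map.mp hl
      apply List.pairwise_map.mpr
      have hfil : ((pvU data).filter (fun v => pvCnt data v == c)).Pairwise
          (fun a b => pvIdx data a < pvIdx data b) :=
        hU.sublist List.filter_sublist
      refine hfil.imp_of_mem ?_
      intro a b ha hb hab
      have hca : pvCnt data a = c := by simpa using (List.of_mem_filter ha)
      have hcb : pvCnt data b = c := by simpa using (List.of_mem_filter hb)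
      simp only [pvLtB, pvF, Bool.or_eq_true, Bool.and_eq_true, Bool.not_eq_true',
        decide_eq_true_eq, decide_eq_false_iff_not]
      omega
    · apply List.pairwise_map.mpr
      refine (pvCs_pairwise_gt data).imp_of_mem ?_
      intro c1 c2 _ _ hgt x hx y hy
      obtain ⟨a, ha, rfl⟩ := List.mem_map.mp hx
      obtain ⟨b, hb, rfl⟩ := List.mem_map.mp hy
      have hca : pvCnt data a = c1 := by simpa using (List.of_mem_filter ha)
      have hcb : pvCnt data b = c2 := by simpa using (List.of_mem_filter hb)
      simp only [pvLtB, pvF, Bool.or_eq_true, Bool.and_eq_true, Bool.not_eq_true',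
        decide_eq_true_eq, decide_eq_false_iff_not]
      omega
  exact pv_pairwise_unique (pvS data) (pvT data) ((pvS_perm data).trans hTperm.symm) hSpair hTpair

-- ===== VERDICT (by name: the statement is the Claim_ definition above) =====
theorem mapping_sort_from_list_spec : Claim_equal_mapping_sort_from_list := by
  intro data _
  unfold Spec_mapping_sort_from_list
  rw [pv_lemA, pv_lemB, pv_lemST]
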